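-- pv_equiv track=rewrite | github.com/Stewsburntmonkey/advent-2019 | src/advent/wire.py | check_steps_x
-- ===== SOURCE A (Python) =====
-- def check_steps_x(start_x, end_x, current_y, grid, steps):
--     intersections = []
--
--     x_range = None
--     if start_x < end_x:
--         x_range = range(start_x, end_x+1)
--     else:
--         x_range = reversed(range(end_x, start_x+1))
--
--     for x in x_range:
--         if grid[x][current_y]:
--             intersections.append(grid[x][current_y] + steps)
--
--         steps += 1
--
--     return steps, intersections
-- ===== SOURCE B (Python) =====
-- def check_steps_x(start_x, end_x, current_y, grid, steps):
--     # Divide and conquer over the segment: one signed direction, the final step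
--     # count in closed form, and each hit's step offset computed from its cell
--     # index arithmetically instead of a running counter.
--     sign = 1 if start_x < end_x else -1
--     n = sign * (end_x - start_x) + 1
--
--     def hits(a, k, off):
--         """Intersection values of k cells starting at column a (stepping by
--         sign), the first cell having step offset off."""
--         if k == 0:
--             return []
--         if k == 1:
--             v = grid[a][current_y]
--             return [v + off] if v else []
--         h = k // 2
--         return hits(a, h, off) + hits(a + sign * h, k - h, off + h)
--
--     return steps + n, hits(start_x, n, steps)
-- ===== Notes on version B (the rewrite author's own statement) =====
-- stated objective: alternative
-- what changed: B replaces A's single accumulator loop by divide-and-conquer recursion on the segment: the two direction branches collapse into one signed step, the final step count is the closed form steps + n, and each hit's offset is computed arithmetically from its cell index while the halves' hit lists are concatenated.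
import Mathlib
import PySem

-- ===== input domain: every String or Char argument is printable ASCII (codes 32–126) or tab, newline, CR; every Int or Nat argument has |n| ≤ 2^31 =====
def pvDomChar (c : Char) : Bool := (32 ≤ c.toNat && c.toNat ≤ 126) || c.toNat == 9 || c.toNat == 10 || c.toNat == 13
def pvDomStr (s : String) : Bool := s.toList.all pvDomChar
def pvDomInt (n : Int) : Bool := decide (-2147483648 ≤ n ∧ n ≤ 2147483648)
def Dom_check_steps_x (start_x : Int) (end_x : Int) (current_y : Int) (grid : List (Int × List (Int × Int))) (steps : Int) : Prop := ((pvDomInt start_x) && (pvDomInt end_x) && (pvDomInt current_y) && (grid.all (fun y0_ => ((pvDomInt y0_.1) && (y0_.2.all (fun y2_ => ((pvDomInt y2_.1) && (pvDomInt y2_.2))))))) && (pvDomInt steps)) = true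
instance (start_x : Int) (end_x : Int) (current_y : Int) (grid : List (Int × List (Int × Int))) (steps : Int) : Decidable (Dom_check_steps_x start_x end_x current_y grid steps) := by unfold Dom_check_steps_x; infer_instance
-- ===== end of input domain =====

-- B replaces A's accumulator loop by divide-and-conquer recursion on the segment with
-- closed-form step arithmetic (objective: alternative decomposition, same cost).
-- grid[x][current_y] is ported as a dict getD with defaults []/0; Pre_ below excludes
-- exactly the KeyError inputs, on which the defaults are never relied upon.

-- shared dict-access helper: grid[x][current_y]
def pvLookup (grid : List (Int × List (Int × Int))) (x y : Int) : Int :=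
  (PySem.Dict.mk ((PySem.Dict.mk grid).getD x [])).getD y 0

-- ===== PORT A =====
def check_steps_x (start_x : Int) (end_x : Int) (current_y : Int) (grid : List (Int × List (Int × Int))) (steps : Int) : Int × List Int :=
  let x_range : List Int :=
    if start_x < end_x then PySem.List.pyRange start_x (end_x + 1) 1
    else (PySem.List.pyRange end_x (start_x + 1) 1).reverse
  x_range.foldl
    (fun (st : Int × List Int) x =>
      (st.1 + 1, if pvLookup grid x current_y ≠ 0
                 then st.2 ++ [pvLookup grid x current_y + st.1] else st.2))
    (steps, [])

-- ===== PORT B =====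
-- Source B's inner 'hits': k ≤ 0 (reached only at k = 0) is the empty base case
def pvHits (grid : List (Int × List (Int × Int))) (y sign a k off : Int) : List Int :=
  if k ≤ 0 then []
  else if k = 1 then
    if pvLookup grid a y ≠ 0 then [pvLookup grid a y + off] else []
  else
    pvHits grid y sign a (PySem.Int.floordiv k 2) off ++
    pvHits grid y sign (a + sign * PySem.Int.floordiv k 2) (k - PySem.Int.floordiv k 2)
      (off + PySem.Int.floordiv k 2)
termination_by k.toNat
decreasing_by
  all_goals
    have e : PySem.Int.floordiv k 2 = k / 2 := PySem.Int.floordiv_eq_ediv_of_pos (by omega)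
    omega

def check_steps_x_alt (start_x : Int) (end_x : Int) (current_y : Int) (grid : List (Int × List (Int × Int))) (steps : Int) : Int × List Int :=
  let sign : Int := if start_x < end_x then 1 else -1
  let n : Int := sign * (end_x - start_x) + 1
  (steps + n, pvHits grid current_y sign start_x n steps)

-- ===== PRECONDITION & SPEC =====
-- Pre_ excludes exactly the inputs where the Pythons raise KeyError: some x on the
-- traversed segment missing from grid, or current_y missing from the row of some x in
-- the segment (stated by counting, over the grid's keys: the distinct keys on the
-- segment whose row contains current_y number exactly the segment's length).  It also
-- excludes association lists with duplicate x keys, which cannot arise from a Python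
-- dict argument.
def Pre_check_steps_x (start_x : Int) (end_x : Int) (current_y : Int) (grid : List (Int × List (Int × Int))) (steps : Int) : Prop :=
  (grid.map Prod.fst).Nodup ∧
  ((grid.map Prod.fst).filter (fun k =>
      decide (min start_x end_x ≤ k) && decide (k ≤ max start_x end_x) &&
      (PySem.Dict.mk ((PySem.Dict.mk grid).getD k [])).contains current_y)).length
    = (max start_x end_x + 1 - min start_x end_x).toNat
instance (start_x : Int) (end_x : Int) (current_y : Int) (grid : List (Int × List (Int × Int))) (steps : Int) : Decidable (Pre_check_steps_x start_x end_x current_y grid steps) := by unfold Pre_check_steps_x; infer_instance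

def pvWitness_check_steps_x : Int × Int × Int × (List (Int × List (Int × Int))) × Int :=
  (0, 2, 1, [(0, [(1, 0)]), (1, [(1, 7)]), (2, [(1, 3)])], 5)

def Spec_check_steps_x (start_x : Int) (end_x : Int) (current_y : Int) (grid : List (Int × List (Int × Int))) (steps : Int) (out : Int × List Int) : Prop := out = check_steps_x_alt start_x end_x current_y grid steps
instance (start_x : Int) (end_x : Int) (current_y : Int) (grid : List (Int × List (Int × Int))) (steps : Int) (out : Int × List Int) : Decidable (Spec_check_steps_x start_x end_x current_y grid steps out) := by unfold Spec_check_steps_x; infer_instance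

-- ===== CLAIM (what is proved, stated in full; the proofs are below) =====
def Claim_equal_check_steps_x : Prop := ∀ (start_x : Int) (end_x : Int) (current_y : Int) (grid : List (Int × List (Int × Int))) (steps : Int), Dom_check_steps_x start_x end_x current_y grid steps → Pre_check_steps_x start_x end_x current_y grid steps → Spec_check_steps_x start_x end_x current_y grid steps (check_steps_x start_x end_x current_y grid steps)

-- ===== LEMMAS AND PROOFS =====

-- shifting the enumerate start only shifts the added constant
lemma pv_enum_shift (v : Int → Int) :
    ∀ (l : List Int) (i c : Int),
      (PySem.List.enumerate l i).filterMap
        (fun p => if v p.2 ≠ 0 then some (v p.2 + c + p.1) else none)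
      = (PySem.List.enumerate l 0).filterMap
        (fun p => if v p.2 ≠ 0 then some (v p.2 + (c + i) + p.1) else none) := by
  intro l
  induction l with
  | nil => intro i c; simp [PySem.List.enumerate_nil]
  | cons x t ih =>
      intro i c
      rw [PySem.List.enumerate_cons, PySem.List.enumerate_cons]
      simp only [List.filterMap_cons, zero_add]
      rw [ih (i + 1) c, ih 1 (c + i)]
      have h1 : c + (i + 1) = c + i + 1 := by ring
      rw [h1]
      by_cases hv : v x = 0
      · simp [hv]
      · simp [hv]; omega

-- the accumulator loop of A produces the step count and the index-tagged hits
lemma pv_fold_eq (v : Int → Int) :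
    ∀ (l : List Int) (s : Int) (acc : List Int),
      l.foldl (fun (st : Int × List Int) x =>
          (st.1 + 1, if v x ≠ 0 then st.2 ++ [v x + st.1] else st.2)) (s, acc)
      = (s + (l.length : Int),
         acc ++ (PySem.List.enumerate l 0).filterMap
           (fun p => if v p.2 ≠ 0 then some (v p.2 + s + p.1) else none)) := by
  intro l
  induction l with
  | nil => intro s acc; simp [PySem.List.enumerate_nil]
  | cons x t ih =>
      intro s acc
      rw [List.foldl_cons, ih]
      rw [PySem.List.enumerate_cons]
      simp only [List.filterMap_cons, zero_add]
      rw [pv_enum_shift v t 1 s]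
      by_cases hv : v x = 0
      · simp [hv]; ring
      · simp [hv, Prod.ext_iff]; omega

-- enumerate of an affine image of List.range tags each element with its index
lemma pv_enum_range_map (f : Nat → Int) :
    ∀ n : Nat, PySem.List.enumerate ((List.range n).map f) 0
      = (List.range n).map (fun (k : Nat) => ((k : Int), f k)) := by
  intro n
  induction n with
  | zero => simp [PySem.List.enumerate_nil]
  | succ m ih =>
      rw [List.range_succ, List.map_append, PySem.List.enumerate_append, ih]
      simp [PySem.List.enumerate_cons, PySem.List.enumerate_nil]

-- the divide-and-conquer hit collector in segment-index normal form
lemma pv_hits_eq (grid : List (Int × List (Int × Int))) (y s : Int) :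
    ∀ (a k off : Int),
      pvHits grid y s a k off
      = (List.range k.toNat).filterMap
          (fun (i : Nat) => if pvLookup grid (a + s * (i : Int)) y ≠ 0
            then some (pvLookup grid (a + s * (i : Int)) y + off + (i : Int)) else none) := by
  intro a k off
  induction a, k, off using pvHits.induct grid y s with
  | case1 a k off hk =>
      rw [pvHits]
      simp [hk, Int.toNat_of_nonpos hk]
  | case2 a off hv _ =>
      rw [pvHits]
      simp [List.range_succ, hv]
  | case3 a off hv _ =>
      rw [not_not] at hv
      rw [pvHits]
      simp [List.range_succ, hv]
  | case4 a k off hk hk1 ih1 ih2 =>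
      have hk2 : 2 ≤ k := by omega
      have hfd : PySem.Int.floordiv k 2 = k / 2 := PySem.Int.floordiv_eq_ediv_of_pos (by omega)
      rw [pvHits]
      simp only [hk, hk1, if_false]
      rw [ih1, ih2]
      have hsplit : k.toNat = (PySem.Int.floordiv k 2).toNat + (k - PySem.Int.floordiv k 2).toNat := by
        rw [hfd]; omega
      rw [hsplit, List.range_add, List.filterMap_append, List.filterMap_map]
      congr 1
      apply List.filterMap_congr
      intro j _
      have hcast : (((PySem.Int.floordiv k 2).toNat + j : Nat) : Int)
          = PySem.Int.floordiv k 2 + (j : Int) := by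
        rw [hfd]; push_cast; omega
      simp only [Function.comp]
      rw [hcast]
      have e1 : a + s * (PySem.Int.floordiv k 2 + (j : Int))
          = a + s * PySem.Int.floordiv k 2 + s * (j : Int) := by ring
      rw [e1]
      split_ifs with hv
      · congr 1
        ring
      · rfl

-- both sides of the claim, for one direction of traversal
lemma pv_both (grid : List (Int × List (Int × Int))) (y sx s steps n : Int) (N : Nat)
    (hn : n.toNat = N) (hN : (N : Int) = n) :
    ((List.range N).map (fun (k : Nat) => sx + s * (k : Int))).foldl
      (fun (st : Int × List Int) x =>
        (st.1 + 1, if pvLookup grid x y ≠ 0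
                   then st.2 ++ [pvLookup grid x y + st.1] else st.2))
      (steps, [])
    = (steps + n, pvHits grid y s sx n steps) := by
  rw [pv_fold_eq (fun x => pvLookup grid x y)
      ((List.range N).map (fun (k : Nat) => sx + s * (k : Int))) steps []]
  rw [pv_hits_eq grid y s sx n steps, hn]
  rw [pv_enum_range_map, List.filterMap_map]
  rw [Prod.ext_iff]
  constructor
  · simp [hN]
  · simp only [List.nil_append]
    apply List.filterMap_congr
    intro k _
    rfl

-- ===== VERDICT (by name: the statement is the Claim_ definition above) =====
theorem check_steps_x_spec : Claim_equal_check_steps_x := by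
  intro sx ex y grid steps _ _
  unfold Spec_check_steps_x check_steps_x check_steps_x_alt
  by_cases hlt : sx < ex
  · -- ascending traversal: sign = 1
    simp only [if_pos hlt]
    have hr : PySem.List.pyRange sx (ex + 1) 1
        = (List.range (1 * (ex - sx) + 1).toNat).map (fun (k : Nat) => sx + 1 * (k : Int)) := by
      rw [PySem.List.pyRange_one]
      have : (ex + 1 - sx).toNat = (1 * (ex - sx) + 1).toNat := by omega
      rw [this]
      apply List.map_congr_left
      intro k _
      ring
    rw [hr, pv_both grid y sx 1 steps (1 * (ex - sx) + 1) ((1 * (ex - sx) + 1).toNat) rfl (by omega)]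
  · -- descending (or single-cell) traversal: sign = -1
    simp only [if_neg hlt]
    have hr : (PySem.List.pyRange ex (sx + 1) 1).reverse
        = (List.range (-1 * (ex - sx) + 1).toNat).map (fun (k : Nat) => sx + (-1) * (k : Int)) := by
      have h1 : (PySem.List.pyRange ex (sx + 1) 1).reverse
          = PySem.List.pyRange sx (ex - 1) (-1) := by
        rw [PySem.List.pyRange_neg_one_eq_reverse]
        norm_num
      rw [h1, PySem.List.pyRange_neg_one]
      have h2 : (sx - (ex - 1)).toNat = (-1 * (ex - sx) + 1).toNat := by omega
      rw [h2]
      apply List.map_congr_left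
      intro k _
      ring
    rw [hr, pv_both grid y sx (-1) steps (-1 * (ex - sx) + 1) ((-1 * (ex - sx) + 1).toNat) rfl (by omega)]
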